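-- pv_equiv track=rewrite | github.com/emrefkucuk/transcrypt | llm_steganography/utils.py | distribute_bits_naturally
-- ===== SOURCE A (Python) =====
-- from typing import List, Dict, Any, Tuple
--
-- def distribute_bits_naturally(text: str, bits: List[int]) -> str:
--     """
--     Distribute bits throughout text in a natural way.
--
--     Args:
--         text: Text to embed bits in
--         bits: Bits to embed
--
--     Returns:
--         Modified text with embedded bits
--     """
--     words = text.split()
--     result_words = []
--     bit_index = 0
--
--     for i, word in enumerate(words):
--         if bit_index >= len(bits):
--             # All bits embedded, add remaining words
--             result_words.extend(words[i:])
--             break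
--
--         # Only modify some words based on length and position
--         if len(word) >= 4 and i % 3 == 0:
--             # Use various natural text modifications to encode bits
--             if bits[bit_index] == 1:
--                 # For bit 1: Various modifications
--                 if "'" not in word:
--                     # Maybe add a contraction
--                     if word.endswith('s'):
--                         word = word[:-1] + "'s"
--                 else:
--                     # Or switch between contractions
--                     word = word.replace("n't", " not")
--             else:
--                 # For bit 0: Other modifications
--                 if "'" in word:
--                     # Remove contraction
--                     word = word.replace("'s", "s")
--
--             bit_index += 1
--
--         result_words.append(word)
--
--     return ' '.join(result_words)
-- ===== SOURCE B (Python) =====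
-- def distribute_bits_naturally(text: str, bits) -> str:
--     # Recursive chunk decomposition: because only every 3rd word (index % 3 == 0)
--     # is a candidate, process the word list in groups of three; the head of each
--     # group is encoded with the next bit iff it is long enough, the other two
--     # words pass through untouched.  Bits are a list consumed from the front;
--     # once empty, the remaining words are returned as-is.  No indices, no
--     # counters, no mapping.
--     def go(ws, bs):
--         if not ws:
--             return []
--         if not bs:
--             return ws
--         head = ws[0]
--         if len(head) >= 4:
--             head = encode(head, bs[0])
--             bs = bs[1:]
--         return [head] + ws[1:3] + go(ws[3:], bs)
--     return ' '.join(go(text.split(), bits))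
--
--
-- def encode(word, bit):
--     if bit == 1:
--         if "'" not in word:
--             return word[:-1] + "'s" if word.endswith('s') else word
--         return word.replace("n't", " not")
--     return word.replace("'s", "s") if "'" in word else word
-- ===== Notes on version B (the rewrite author's own statement) =====
-- stated objective: alternative
-- what changed: Replaces A's single indexed loop with a bit counter, i % 3 test and early break by a recursion over the word list in chunks of three: each chunk's head is the only candidate (encoded iff len >= 4, consuming one bit from the front of the bits list), the other two words pass through, and when the bits list is empty the remaining words are returned unchanged; no indices or counters remain.
import Mathlib
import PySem

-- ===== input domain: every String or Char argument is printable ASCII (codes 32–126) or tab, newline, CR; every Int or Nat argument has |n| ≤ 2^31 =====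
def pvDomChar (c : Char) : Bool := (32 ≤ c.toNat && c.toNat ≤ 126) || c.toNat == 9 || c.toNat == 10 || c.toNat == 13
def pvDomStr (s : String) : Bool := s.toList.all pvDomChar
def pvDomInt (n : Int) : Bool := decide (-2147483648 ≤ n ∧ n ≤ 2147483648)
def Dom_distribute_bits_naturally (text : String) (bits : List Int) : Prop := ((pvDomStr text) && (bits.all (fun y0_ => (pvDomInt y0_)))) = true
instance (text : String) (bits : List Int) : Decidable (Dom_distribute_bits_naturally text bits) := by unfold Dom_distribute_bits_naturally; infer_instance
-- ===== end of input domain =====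

-- B replaces A's indexed loop (bit counter, i % 3 test, early break) by a recursion
-- over the word list in chunks of three: each chunk's head is the only edit candidate.


-- ===== PORT A =====
-- A's for-loop over enumerate(words) with bit_index and the break/extend on exhausted bits.
def pvALoop (bits : List Int) : List String → Int → Nat → List String
  | [], _, _ => []
  | word :: rest, i, bitIndex =>
    if bitIndex ≥ bits.length then
      word :: rest                      -- result_words.extend(words[i:]); break
    else if 4 ≤ PySem.Str.len word ∧ PySem.Int.mod i 3 = 0 then
      (let b := bits.getD bitIndex 0;   -- bits[bit_index]; in range by the guard above
       (if b = 1 then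
          if PySem.Str.isIn "'" word = false then
            (if PySem.Str.endswith word "s" then PySem.Str.slice word none (some (-1)) ++ "'s" else word)
          else PySem.Str.replace word "n't" " not"
        else
          if PySem.Str.isIn "'" word = true then PySem.Str.replace word "'s" "s" else word)
         :: pvALoop bits rest (i + 1) (bitIndex + 1))
    else
      word :: pvALoop bits rest (i + 1) bitIndex

def distribute_bits_naturally (text : String) (bits : List Int) : String :=
  PySem.Str.join " " (pvALoop bits (PySem.Str.split₀ text) 0 0)

-- ===== PORT B =====
-- B's encode helper
def pvEnc (word : String) (b : Int) : String :=
  if b = 1 then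
    if PySem.Str.isIn "'" word = false then
      (if PySem.Str.endswith word "s" then PySem.Str.slice word none (some (-1)) ++ "'s" else word)
    else PySem.Str.replace word "n't" " not"
  else
    if PySem.Str.isIn "'" word = true then PySem.Str.replace word "'s" "s" else word

-- ws[3:] = drop 3 (cited by pvGo's termination proof)
theorem pvSliceTail (l : List String) : PySem.List.slice l (some 3) none = l.drop 3 := by
  rw [show (3 : Int) = ((3 : Nat) : Int) from rfl, PySem.List.slice_from_natCast]

-- B's inner recursion go(ws, bs): chunks of three, head of each chunk is the candidate.
def pvGo : List String → List Int → List String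
  | [], _ => []
  | w :: rest, [] => w :: rest
  | w :: rest, b :: bs =>
    if 4 ≤ PySem.Str.len w then
      pvEnc w b :: (PySem.List.slice (w :: rest) (some 1) (some 3)
        ++ pvGo (PySem.List.slice (w :: rest) (some 3) none) bs)
    else
      w :: (PySem.List.slice (w :: rest) (some 1) (some 3)
        ++ pvGo (PySem.List.slice (w :: rest) (some 3) none) (b :: bs))
  termination_by ws _ => ws.length
  decreasing_by
    · rw [pvSliceTail]; simp
    · rw [pvSliceTail]; simp

def distribute_bits_naturally_alt (text : String) (bits : List Int) : String :=
  PySem.Str.join " " (pvGo (PySem.Str.split₀ text) bits)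

-- ===== PRECONDITION & SPEC =====
def Spec_distribute_bits_naturally (text : String) (bits : List Int) (out : String) : Prop := out = distribute_bits_naturally_alt text bits
instance (text : String) (bits : List Int) (out : String) : Decidable (Spec_distribute_bits_naturally text bits out) := by unfold Spec_distribute_bits_naturally; infer_instance

-- ===== CLAIM (what is proved, stated in full; the proofs are below) =====
def Claim_equal_distribute_bits_naturally : Prop := ∀ (text : String) (bits : List Int), Dom_distribute_bits_naturally text bits → Spec_distribute_bits_naturally text bits (distribute_bits_naturally text bits)

-- ===== LEMMAS AND PROOFS =====

-- A's loop, reformulated so that it consumes the list of remaining bits.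
def pvLoopA' : List Int → List String → Int → List String
  | _, [], _ => []
  | [], word :: rest, _ => word :: rest
  | b :: rem, word :: rest, i =>
    if 4 ≤ PySem.Str.len word ∧ PySem.Int.mod i 3 = 0 then
      pvEnc word b :: pvLoopA' rem rest (i + 1)
    else
      word :: pvLoopA' (b :: rem) rest (i + 1)

theorem pvALoop_eq_loopA' (bits : List Int) (ws : List String) :
    ∀ (i : Int) (bi : Nat), pvALoop bits ws i bi = pvLoopA' (bits.drop bi) ws i := by
  induction ws with
  | nil => intro i bi; cases h : bits.drop bi <;> simp [pvALoop, pvLoopA']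
  | cons w rest ih =>
    intro i bi
    by_cases hbi : bi ≥ bits.length
    · have : bits.drop bi = [] := List.drop_eq_nil_of_le hbi
      simp [pvALoop, hbi, this, pvLoopA']
    · replace hbi : bi < bits.length := by omega
      have hd : bits.drop bi = bits[bi] :: bits.drop (bi + 1) := List.drop_eq_getElem_cons hbi
      have hg : bits.getD bi 0 = bits[bi] := List.getD_eq_getElem bits 0 hbi
      rw [hd]
      by_cases hc : 4 ≤ PySem.Str.len w ∧ PySem.Int.mod i 3 = 0
      · simp only [pvALoop, pvLoopA', if_neg (by omega : ¬ bi ≥ bits.length), if_pos hc, hg, ih]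
        rfl
      · simp only [pvALoop, pvLoopA', if_neg (by omega : ¬ bi ≥ bits.length), if_neg hc, ih, hd]

-- ws[1:3] = take 2 of the tail
theorem pvSliceMid (l : List String) : PySem.List.slice l (some 1) (some 3) = (l.drop 1).take 2 := by
  rw [show (1 : Int) = ((1 : Nat) : Int) from rfl, show (3 : Int) = ((3 : Nat) : Int) from rfl,
    PySem.List.slice_natCast]

-- a non-candidate position (index ≢ 0 mod 3) passes its word through with bits untouched
theorem pvSkip (rem : List Int) (x : String) (tl : List String) (j : Int)
    (h : PySem.Int.mod j 3 ≠ 0) : pvLoopA' rem (x :: tl) j = x :: pvLoopA' rem tl (j + 1) := by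
  cases rem with
  | nil => cases tl <;> simp [pvLoopA']
  | cons b bs =>
    simp only [pvLoopA']
    rw [if_neg (by tauto)]

theorem pvModSucc (i : Int) (h : PySem.Int.mod i 3 = 0) :
    PySem.Int.mod (i + 1) 3 ≠ 0 ∧ PySem.Int.mod (i + 2) 3 ≠ 0 ∧ PySem.Int.mod (i + 3) 3 = 0 := by
  rw [PySem.Int.mod_eq_emod_of_pos (by norm_num)] at h
  rw [PySem.Int.mod_eq_emod_of_pos (by norm_num), PySem.Int.mod_eq_emod_of_pos (by norm_num),
    PySem.Int.mod_eq_emod_of_pos (by norm_num)]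
  omega

theorem pvMain : ∀ (n : Nat) (ws : List String), ws.length ≤ n →
    ∀ (rem : List Int) (i : Int), PySem.Int.mod i 3 = 0 → pvLoopA' rem ws i = pvGo ws rem := by
  intro n
  induction n with
  | zero =>
    intro ws h rem i _
    have : ws = [] := by cases ws <;> simp_all
    subst this
    cases rem <;> simp [pvLoopA', pvGo]
  | succ n ih =>
    intro ws hlen rem i hmod
    cases ws with
    | nil => cases rem <;> simp [pvLoopA', pvGo]
    | cons w rest =>
      cases rem with
      | nil => simp [pvLoopA', pvGo]
      | cons b bs =>
        obtain ⟨h1, h2, h3⟩ := pvModSucc i hmod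
        simp only [pvGo, pvSliceMid, pvSliceTail, List.drop_succ_cons, List.drop_zero]
        by_cases hw : 4 ≤ PySem.Str.len w
        · simp only [pvLoopA', if_pos (And.intro hw hmod), if_pos hw]
          cases rest with
          | nil => simp [pvLoopA', pvGo]
          | cons x tl1 =>
            rw [pvSkip bs x tl1 (i + 1) h1]
            cases tl1 with
            | nil => simp [pvLoopA', pvGo]
            | cons y tl =>
              rw [pvSkip bs y tl (i + 1 + 1) (by rw [show i + 1 + 1 = i + 2 by ring]; exact h2)]
              rw [ih tl (by simp at hlen ⊢; omega) bs (i + 1 + 1 + 1)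
                (by rw [show i + 1 + 1 + 1 = i + 3 by ring]; exact h3)]
              simp
        · have hcond : ¬ (4 ≤ PySem.Str.len w ∧ PySem.Int.mod i 3 = 0) := fun hc => hw hc.1
          simp only [pvLoopA', if_neg hcond, if_neg hw]
          cases rest with
          | nil => simp [pvLoopA', pvGo]
          | cons x tl1 =>
            rw [pvSkip (b :: bs) x tl1 (i + 1) h1]
            cases tl1 with
            | nil => simp [pvLoopA', pvGo]
            | cons y tl =>
              rw [pvSkip (b :: bs) y tl (i + 1 + 1) (by rw [show i + 1 + 1 = i + 2 by ring]; exact h2)]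
              rw [ih tl (by simp at hlen ⊢; omega) (b :: bs) (i + 1 + 1 + 1)
                (by rw [show i + 1 + 1 + 1 = i + 3 by ring]; exact h3)]
              simp

-- ===== VERDICT (by name: the statement is the Claim_ definition above) =====
theorem distribute_bits_naturally_spec : Claim_equal_distribute_bits_naturally := by
  intro text bits _
  unfold Spec_distribute_bits_naturally distribute_bits_naturally distribute_bits_naturally_alt
  congr 1
  rw [pvALoop_eq_loopA' bits (PySem.Str.split₀ text) 0 0, List.drop_zero]
  exact pvMain (PySem.Str.split₀ text).length (PySem.Str.split₀ text) le_rfl bits 0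
    (by rw [PySem.Int.mod_eq_emod_of_pos (by norm_num)]; norm_num)
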